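-- pv_equiv track=rewrite | github.com/antonioalvarezl/2026-BibTeX-merger | core.py | has_balanced_outer_braces
-- ===== SOURCE A (Python) =====
-- def has_balanced_outer_braces(value: str) -> bool:
--     if not (value.startswith("{") and value.endswith("}")):
--         return False
--     depth = 0
--     for idx, ch in enumerate(value):
--         if ch == "{":
--             depth += 1
--         elif ch == "}":
--             depth -= 1
--             if depth == 0 and idx != len(value) - 1:
--                 return False
--     return depth == 0
-- ===== SOURCE B (Python) =====
-- def _skip_group(s, i):
--     """s[i] is an opening brace; return the index just past its matching closer, or None."""
--     i += 1
--     while i < len(s):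
--         c = s[i]
--         if c == "}":
--             return i + 1
--         if c == "{":
--             j = _skip_group(s, i)
--             if j is None:
--                 return None
--             i = j
--         else:
--             i += 1
--     return None
--
--
-- def has_balanced_outer_braces(value: str) -> bool:
--     if not (value.startswith("{") and value.endswith("}")):
--         return False
--     return _skip_group(value, 0) == len(value)
-- ===== Notes on version B (the rewrite author's own statement) =====
-- stated objective: alternative
-- what changed: Replaces A's single-pass depth counter (with the inline zero-depth early-return) by a recursive-descent parser that finds the matching brace of the first opener by recursion on nesting and checks it is the last character.
import Mathlib
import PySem

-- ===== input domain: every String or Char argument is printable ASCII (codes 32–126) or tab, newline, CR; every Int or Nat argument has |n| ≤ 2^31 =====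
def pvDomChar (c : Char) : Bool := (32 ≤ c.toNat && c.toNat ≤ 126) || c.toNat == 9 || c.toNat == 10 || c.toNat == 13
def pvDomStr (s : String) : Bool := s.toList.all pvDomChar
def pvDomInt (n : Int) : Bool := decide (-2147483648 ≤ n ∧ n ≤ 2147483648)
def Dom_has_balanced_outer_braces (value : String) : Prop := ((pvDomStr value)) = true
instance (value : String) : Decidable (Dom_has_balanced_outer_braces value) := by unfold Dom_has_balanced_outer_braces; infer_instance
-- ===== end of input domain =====

-- B replaces A's depth-counter scan by a recursive-descent parser that skips the group
-- opened by the first character and checks it closes exactly at the last one; alternative decomposition, same cost.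


-- ===== PORT A =====
-- for idx, ch in enumerate(value): … with the early 'return False'
def hbobLoopA (cs : List Char) (idx : Int) (depth : Int) (n : Int) : Bool :=
  match cs with
  | [] => depth == 0
  | ch :: rest =>
    if ch = '{' then hbobLoopA rest (idx + 1) (depth + 1) n
    else if ch = '}' then
      if depth - 1 == 0 && idx != n - 1 then false
      else hbobLoopA rest (idx + 1) (depth - 1) n
    else hbobLoopA rest (idx + 1) depth n

def has_balanced_outer_braces (value : String) : Bool :=
  if !(PySem.Str.startswith value "{" && PySem.Str.endswith value "}") then false
  else hbobLoopA value.toList 0 0 (value.toList.length : Int)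

-- ===== PORT B =====
-- _skip_group(s, i) of Source B, on the suffix of s starting at i+1: returns the suffix just
-- past the closer matching the opener at i, or none. The subtype bound is only for termination.
def hbobSkip : (cs : List Char) → Option { l : List Char // l.length ≤ cs.length }
  | [] => none
  | c :: rest =>
    if c = '}' then some ⟨rest, by simp⟩
    else if c = '{' then
      match hbobSkip rest with
      | none => none
      | some ⟨r1, h1⟩ =>
        match hbobSkip r1 with
        | none => none
        | some ⟨r2, h2⟩ => some ⟨r2, by simp; omega⟩
    else
      match hbobSkip rest with
      | none => none
      | some ⟨r1, h1⟩ => some ⟨r1, by simp; omega⟩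
termination_by cs => cs.length
decreasing_by
  · simp
  · simp; omega
  · simp

def has_balanced_outer_braces_alt (value : String) : Bool :=
  if !(PySem.Str.startswith value "{" && PySem.Str.endswith value "}") then false
  else
    -- _skip_group(value, 0) == len(value)  ⇔  the remaining suffix is empty
    match hbobSkip value.toList.tail with
    | some ⟨[], _⟩ => true
    | _ => false

-- ===== PRECONDITION & SPEC =====
def Spec_has_balanced_outer_braces (value : String) (out : Bool) : Prop := out = has_balanced_outer_braces_alt value
instance (value : String) (out : Bool) : Decidable (Spec_has_balanced_outer_braces value out) := by unfold Spec_has_balanced_outer_braces; infer_instance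

-- ===== CLAIM (what is proved, stated in full; the proofs are below) =====
def Claim_equal_has_balanced_outer_braces : Prop := ∀ (value : String), Dom_has_balanced_outer_braces value → Spec_has_balanced_outer_braces value (has_balanced_outer_braces value)

-- ===== LEMMAS AND PROOFS =====

-- reference scan: from nesting depth d, the suffix just past the '}' that closes depth 1
def hbobFC : List Char → Nat → Option (List Char)
  | [], _ => none
  | c :: rest, d =>
    if c = '{' then hbobFC rest (d + 1)
    else if c = '}' then (if d = 1 then some rest else hbobFC rest (d - 1))
    else hbobFC rest d

theorem hbobFC_len (cs : List Char) (d : Nat) (r : List Char)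
    (h : hbobFC cs d = some r) : r.length < cs.length := by
  induction cs generalizing d with
  | nil => simp [hbobFC] at h
  | cons c rest ih =>
    unfold hbobFC at h
    split_ifs at h with h1 h2 h3
    · have := ih _ h; simpa using Nat.lt_succ_of_lt this
    · cases h; simp
    · have := ih _ h; simpa using Nat.lt_succ_of_lt this
    · have := ih _ h; simpa using Nat.lt_succ_of_lt this

theorem hbobFC_succ (n : Nat) : ∀ (cs : List Char), cs.length ≤ n → ∀ (d : Nat), 1 ≤ d →
    hbobFC cs (d + 1) = (hbobFC cs 1).bind (fun r => hbobFC r d) := by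
  induction n with
  | zero =>
    intro cs hcs d _
    have : cs = [] := List.eq_nil_of_length_eq_zero (Nat.le_zero.mp hcs)
    subst this; simp [hbobFC]
  | succ n ih =>
    intro cs hcs d hd
    cases cs with
    | nil => simp [hbobFC]
    | cons c rest =>
      have hr : rest.length ≤ n := by simpa using Nat.lt_succ_iff.mp (Nat.lt_of_lt_of_le (by simp) hcs)
      by_cases h1 : c = '{'
      · rw [show hbobFC (c :: rest) (d + 1) = hbobFC rest (d + 1 + 1) from by simp [hbobFC, h1],
            show hbobFC (c :: rest) 1 = hbobFC rest 2 from by simp [hbobFC, h1]]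
        rw [ih rest hr (d + 1) (by omega), ih rest hr 1 (by omega)]
        cases hfc : hbobFC rest 1 with
        | none => simp
        | some r =>
          have hrlen : r.length ≤ n := Nat.le_of_lt (Nat.lt_of_lt_of_le (hbobFC_len rest 1 r hfc) hr)
          simp only [Option.bind_some]
          rw [ih r hrlen d hd]
      · by_cases h2 : c = '}'
        · rw [show hbobFC (c :: rest) (d + 1) = hbobFC rest d from by
                simp [hbobFC, h2]
                exact fun h => absurd h (by omega),
              show hbobFC (c :: rest) 1 = some rest from by simp [hbobFC, h2]]
          simp
        · rw [show hbobFC (c :: rest) (d + 1) = hbobFC rest (d + 1) from by simp [hbobFC, h1, h2],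
              show hbobFC (c :: rest) 1 = hbobFC rest 1 from by simp [hbobFC, h1, h2]]
          exact ih rest hr d hd

theorem hbobSkip_eq_hbobFC (n : Nat) : ∀ (cs : List Char), cs.length ≤ n →
    (hbobSkip cs).map Subtype.val = hbobFC cs 1 := by
  induction n with
  | zero =>
    intro cs hcs
    have : cs = [] := List.eq_nil_of_length_eq_zero (Nat.le_zero.mp hcs)
    subst this; simp [hbobSkip, hbobFC]
  | succ n ih =>
    intro cs hcs
    cases cs with
    | nil => simp [hbobSkip, hbobFC]
    | cons c rest =>
      have hr : rest.length ≤ n := by simpa using Nat.lt_succ_iff.mp (Nat.lt_of_lt_of_le (by simp) hcs)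
      by_cases h2 : c = '}'
      · simp [hbobSkip, hbobFC, h2]
      · by_cases h1 : c = '{'
        · rw [show hbobFC (c :: rest) 1 = hbobFC rest 2 from by simp [hbobFC, h1],
              hbobFC_succ n rest hr 1 (le_refl 1), ← ih rest hr]
          rw [hbobSkip]
          cases hsk : hbobSkip rest with
          | none => simp [h1]
          | some r1s =>
            obtain ⟨r1, hl1⟩ := r1s
            have hr1 : r1.length ≤ n := Nat.le_trans hl1 hr
            simp only [h1, if_true, Option.map_some, Option.bind_some]
            rw [← ih r1 hr1]
            cases hbobSkip r1 with
            | none => simp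
            | some r2s => cases r2s; simp
        · rw [show hbobFC (c :: rest) 1 = hbobFC rest 1 from by simp [hbobFC, h1, h2], ← ih rest hr]
          rw [hbobSkip]
          cases hsk : hbobSkip rest with
          | none => simp [h2, h1]
          | some r1s => obtain ⟨r1, hl1⟩ := r1s; simp [h2, h1]

-- A's scan from depth d ≥ 1 succeeds iff the group closes exactly at the end of the string
theorem hbobLoopA_eq_hbobFC (cs : List Char) : ∀ (idx : Int) (d : Nat) (n : Int), 1 ≤ d →
    idx + (cs.length : Int) = n →
    hbobLoopA cs idx (d : Int) n = (hbobFC cs d == some ([] : List Char)) := by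
  induction cs with
  | nil =>
    intro idx d n hd _
    have : ((d : Int) == 0) = false := by simp; omega
    simp [hbobLoopA, hbobFC, this]
  | cons c rest ih =>
    intro idx d n hd hn
    have hn' : idx + 1 + (rest.length : Int) = n := by
      simp only [List.length_cons] at hn; push_cast at hn; omega
    by_cases h1 : c = '{'
    · rw [show hbobLoopA (c :: rest) idx (d : Int) n = hbobLoopA rest (idx + 1) ((d : Int) + 1) n
          from by simp [hbobLoopA, h1],
          show hbobFC (c :: rest) d = hbobFC rest (d + 1) from by simp [hbobFC, h1],
          show ((d : Int) + 1) = ((d + 1 : Nat) : Int) from by push_cast; ring]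
      exact ih (idx + 1) (d + 1) n (by omega) hn'
    · by_cases h2 : c = '}'
      · by_cases hd1 : d = 1
        · subst hd1
          rw [Nat.cast_one]
          have hz : ((1 : Int) - 1 == 0) = true := by decide
          cases rest with
          | nil =>
            have hix : (idx != n - 1) = false := by
              simp only [List.length_nil, Nat.cast_zero] at hn'
              have : idx = n - 1 := by omega
              simp [this]
            rw [show hbobLoopA (c :: []) idx (1 : Int) n = hbobLoopA [] (idx + 1) 0 n
                from by simp [hbobLoopA, h2, hix]]
            simp [hbobLoopA, hbobFC, h2]
          | cons r rs =>
            have hix : (idx != n - 1) = true := by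
              simp only [List.length_cons] at hn'; push_cast at hn'
              have : idx ≠ n - 1 := by omega
              simp [this]
            rw [show hbobLoopA (c :: r :: rs) idx (1 : Int) n = false
                from by simp [hbobLoopA, h2, hix]]
            simp [hbobFC, h2]
        · have hz : ((d : Int) - 1 == 0) = false := by simp; omega
          rw [show hbobLoopA (c :: rest) idx (d : Int) n = hbobLoopA rest (idx + 1) ((d : Int) - 1) n
              from by simp [hbobLoopA, h2, hz],
              show hbobFC (c :: rest) d = hbobFC rest (d - 1) from by simp [hbobFC, h2, hd1],
              show ((d : Int) - 1) = ((d - 1 : Nat) : Int) from by push_cast [Nat.cast_sub hd]; ring]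
          exact ih (idx + 1) (d - 1) n (by omega) hn'
      · rw [show hbobLoopA (c :: rest) idx (d : Int) n = hbobLoopA rest (idx + 1) (d : Int) n
            from by simp [hbobLoopA, h1, h2],
            show hbobFC (c :: rest) d = hbobFC rest d from by simp [hbobFC, h1, h2]]
        exact ih (idx + 1) d n hd hn'

-- the B-side match on (hbobSkip …), rephrased without the dependent pattern
theorem hbobAlt_eq (value : String) :
    has_balanced_outer_braces_alt value =
      (if !(PySem.Str.startswith value "{" && PySem.Str.endswith value "}") then false
       else ((hbobSkip value.toList.tail).map Subtype.val == some ([] : List Char))) := by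
  unfold has_balanced_outer_braces_alt
  cases PySem.Str.startswith value "{" && PySem.Str.endswith value "}" with
  | false => simp
  | true =>
    simp only [Bool.not_true, Bool.false_eq_true, if_false]
    cases h : hbobSkip value.toList.tail with
    | none => simp
    | some rs => obtain ⟨r, hr⟩ := rs; cases r <;> simp

-- ===== VERDICT (by name: the statement is the Claim_ definition above) =====
theorem has_balanced_outer_braces_spec : Claim_equal_has_balanced_outer_braces := by
  intro value _
  unfold Spec_has_balanced_outer_braces has_balanced_outer_braces
  rw [hbobAlt_eq]
  cases hg : (PySem.Str.startswith value "{" && PySem.Str.endswith value "}") with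
  | false => simp
  | true =>
    simp only [Bool.not_true, Bool.false_eq_true, if_false]
    have hsw : PySem.Chars.startswith value.toList ("{".toList) = true := by
      have := (Bool.and_eq_true _ _).mp hg |>.1
      simpa [PySem.Str.startswith] using this
    obtain ⟨rest, hrest⟩ := (PySem.Chars.startswith_iff _ _).mp hsw
    have hrest' : value.toList = '{' :: rest := by rw [← hrest]; rfl
    rw [hrest']
    rw [show hbobLoopA ('{' :: rest) 0 0 ((('{' :: rest : List Char).length : Nat) : Int)
          = hbobLoopA rest 1 ((1 : Nat) : Int) ((('{' :: rest : List Char).length : Nat) : Int)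
        from by simp [hbobLoopA]]
    rw [hbobLoopA_eq_hbobFC rest 1 1 _ (le_refl 1)
        (by simp only [List.length_cons]; push_cast; omega)]
    rw [show ('{' :: rest : List Char).tail = rest from rfl]
    rw [hbobSkip_eq_hbobFC rest.length rest (le_refl _)]
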